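-- pv_equiv track=rewrite | github.com/AndreeZL/chatbot | utils/recomendador.py | generar_recomendaciones
-- ===== SOURCE A (Python) =====
-- def generar_recomendaciones(nivel_estres: str, ansiedad: int, depresion: int, historial=None):
--     """
--     Devuelve una lista de recomendaciones (strings) ordenadas por prioridad.
--     nivel_estres: "bajo", "medio", "alto"
--     ansiedad, depresion: 0 o 1
--     historial: opcional (puedes pasar historial de accesos para personalizar)
--     """
--     recomendaciones = []
--
--     # Reglas para estrés alto
--     if nivel_estres == "alto":
--         if ansiedad and depresion:
--             recomendaciones.append("Haz una pausa ahora: 5 minutos de respiración guiada (4-4-4). Si persiste, contacta con un profesional del directorio.")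
--             recomendaciones.append("Realiza una actividad breve (5–10 min) que te guste. Si tienes pensamientos de autolesión, busca ayuda inmediatamente.")
--         elif ansiedad:
--             recomendaciones.append("Prueba la técnica 4-7-8 de respiración y grounding. Escucha un audio corto de respiración.")
--             recomendaciones.append("Si la ansiedad es recurrente, considera agendar una sesión con un especialista.")
--         elif depresion:
--             recomendaciones.append("Intenta una tarea pequeña y concreta (5-10 min). Si la apatía persiste, busca apoyo profesional.")
--             recomendaciones.append("Actividades programadas (salir a caminar 10 min) pueden ayudar a romper el ciclo.")
--         else:
--             recomendaciones.append("Haz una pausa y realiza respiraciones profundas durante 5 minutos. Si no mejora, busca apoyo.")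
--
--     # Reglas para estrés medio
--     elif nivel_estres == "medio":
--         if ansiedad:
--             recomendaciones.append("Pausa breve + técnica de respiración. Prueba un ejercicio de mindfulness de 5 minutos.")
--         elif depresion:
--             recomendaciones.append("Organiza una micro-tarea que te guste; rompe actividades grandes en pasos pequeños.")
--         else:
--             recomendaciones.append("Tómate una pausa activa y escucha música relajante durante 10 minutos.")
--
--     # Reglas para estrés bajo
--     else:  # 'bajo'
--         if ansiedad or depresion:
--             recomendaciones.append("Mantén rutinas saludables: sueño, ejercicio ligero y contacto social. Haz ejercicios de autocuidado.")
--         else: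
--             recomendaciones.append("¡Vas bien! Mantén tus hábitos saludables. Aquí tienes recursos para continuar.")
--
--     # Añadir sugerencias complementarias generales
--     recomendaciones.append("Revisa el directorio de profesionales si quieres hablar con alguien. (Directorio → Recursos)")
--
--     # Si tienes historial, podrías filtrar recomendaciones ya ofrecidas; por ahora devolvemos todas
--     # elimina duplicados manteniendo orden
--     seen = set()
--     dedup = []
--     for r in recomendaciones:
--         if r not in seen:
--             dedup.append(r)
--             seen.add(r)
--     return dedup
-- ===== SOURCE B (Python) =====
-- _DIRECTORIO = "Revisa el directorio de profesionales si quieres hablar con alguien. (Directorio → Recursos)"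
--
-- _TABLA = {
--     ("alto", True, True): [
--         "Haz una pausa ahora: 5 minutos de respiración guiada (4-4-4). Si persiste, contacta con un profesional del directorio.",
--         "Realiza una actividad breve (5–10 min) que te guste. Si tienes pensamientos de autolesión, busca ayuda inmediatamente.",
--     ],
--     ("alto", True, False): [
--         "Prueba la técnica 4-7-8 de respiración y grounding. Escucha un audio corto de respiración.",
--         "Si la ansiedad es recurrente, considera agendar una sesión con un especialista.",
--     ],
--     ("alto", False, True): [
--         "Intenta una tarea pequeña y concreta (5-10 min). Si la apatía persiste, busca apoyo profesional.",
--         "Actividades programadas (salir a caminar 10 min) pueden ayudar a romper el ciclo.",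
--     ],
--     ("alto", False, False): [
--         "Haz una pausa y realiza respiraciones profundas durante 5 minutos. Si no mejora, busca apoyo.",
--     ],
--     ("medio", True, True): [
--         "Pausa breve + técnica de respiración. Prueba un ejercicio de mindfulness de 5 minutos.",
--     ],
--     ("medio", True, False): [
--         "Pausa breve + técnica de respiración. Prueba un ejercicio de mindfulness de 5 minutos.",
--     ],
--     ("medio", False, True): [
--         "Organiza una micro-tarea que te guste; rompe actividades grandes en pasos pequeños.",
--     ],
--     ("medio", False, False): [
--         "Tómate una pausa activa y escucha música relajante durante 10 minutos.",
--     ],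
--     ("bajo", True, True): [
--         "Mantén rutinas saludables: sueño, ejercicio ligero y contacto social. Haz ejercicios de autocuidado.",
--     ],
--     ("bajo", True, False): [
--         "Mantén rutinas saludables: sueño, ejercicio ligero y contacto social. Haz ejercicios de autocuidado.",
--     ],
--     ("bajo", False, True): [
--         "Mantén rutinas saludables: sueño, ejercicio ligero y contacto social. Haz ejercicios de autocuidado.",
--     ],
--     ("bajo", False, False): [
--         "¡Vas bien! Mantén tus hábitos saludables. Aquí tienes recursos para continuar.",
--     ],
-- }
--
--
-- def generar_recomendaciones(nivel_estres: str, ansiedad: int, depresion: int, historial=None):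
--     nivel = nivel_estres if nivel_estres in ("alto", "medio") else "bajo"
--     return _TABLA[(nivel, bool(ansiedad), bool(depresion))] + [_DIRECTORIO]
-- ===== Notes on version B (the rewrite author's own statement) =====
-- stated objective: idiomatic
-- what changed: Replaces A's nested if/elif decision tree plus the dedup loop by a single precomputed dispatch table keyed on (normalized level, bool(ansiedad), bool(depresion)) with one lookup; the dedup pass is dropped since every table entry already has distinct strings.
import Mathlib
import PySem

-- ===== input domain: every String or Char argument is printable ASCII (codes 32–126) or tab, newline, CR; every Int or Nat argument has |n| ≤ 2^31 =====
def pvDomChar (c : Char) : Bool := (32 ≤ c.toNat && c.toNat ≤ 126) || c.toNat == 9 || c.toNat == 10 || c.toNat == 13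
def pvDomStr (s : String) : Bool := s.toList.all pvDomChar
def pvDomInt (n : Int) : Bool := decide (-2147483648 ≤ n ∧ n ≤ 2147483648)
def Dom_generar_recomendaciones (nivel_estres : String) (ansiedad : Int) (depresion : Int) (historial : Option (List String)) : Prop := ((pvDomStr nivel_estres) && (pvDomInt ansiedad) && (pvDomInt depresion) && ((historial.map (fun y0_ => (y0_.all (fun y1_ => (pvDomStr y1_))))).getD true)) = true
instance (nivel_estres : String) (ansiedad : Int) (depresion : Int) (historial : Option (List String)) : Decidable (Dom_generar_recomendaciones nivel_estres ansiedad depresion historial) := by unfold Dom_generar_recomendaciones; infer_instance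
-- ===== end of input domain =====

-- B replaces A's if/elif decision tree + dedup loop by a precomputed dispatch table keyed on
-- (normalized level, bool(ansiedad), bool(depresion)); objective: idiomatic, same cost.


-- ===== PORT A =====
def generar_recomendaciones (nivel_estres : String) (ansiedad : Int) (depresion : Int) (_historial : Option (List String)) : List String :=
  let recomendaciones : List String :=
    if nivel_estres == "alto" then
      if ansiedad != 0 && depresion != 0 then
        [ "Haz una pausa ahora: 5 minutos de respiración guiada (4-4-4). Si persiste, contacta con un profesional del directorio."
        , "Realiza una actividad breve (5–10 min) que te guste. Si tienes pensamientos de autolesión, busca ayuda inmediatamente." ]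
      else if ansiedad != 0 then
        [ "Prueba la técnica 4-7-8 de respiración y grounding. Escucha un audio corto de respiración."
        , "Si la ansiedad es recurrente, considera agendar una sesión con un especialista." ]
      else if depresion != 0 then
        [ "Intenta una tarea pequeña y concreta (5-10 min). Si la apatía persiste, busca apoyo profesional."
        , "Actividades programadas (salir a caminar 10 min) pueden ayudar a romper el ciclo." ]
      else
        [ "Haz una pausa y realiza respiraciones profundas durante 5 minutos. Si no mejora, busca apoyo." ]
    else if nivel_estres == "medio" then
      if ansiedad != 0 then
        [ "Pausa breve + técnica de respiración. Prueba un ejercicio de mindfulness de 5 minutos." ]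
      else if depresion != 0 then
        [ "Organiza una micro-tarea que te guste; rompe actividades grandes en pasos pequeños." ]
      else
        [ "Tómate una pausa activa y escucha música relajante durante 10 minutos." ]
    else
      if ansiedad != 0 || depresion != 0 then
        [ "Mantén rutinas saludables: sueño, ejercicio ligero y contacto social. Haz ejercicios de autocuidado." ]
      else
        [ "¡Vas bien! Mantén tus hábitos saludables. Aquí tienes recursos para continuar." ]
  let recomendaciones := recomendaciones ++ ["Revisa el directorio de profesionales si quieres hablar con alguien. (Directorio → Recursos)"]
  -- dedup loop: for r in recomendaciones: if r not in seen: dedup.append(r); seen.add(r)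
  let st := recomendaciones.foldl
    (fun (st : PySem.Set String × List String) r =>
      if PySem.Set.contains st.1 r then st else (st.1.add r, st.2 ++ [r]))
    (PySem.Set.ofList [], [])
  st.2

-- ===== PORT B =====
def pvDirectorio : String := "Revisa el directorio de profesionales si quieres hablar con alguien. (Directorio → Recursos)"

def pvTabla : PySem.Dict (String × Bool × Bool) (List String) :=
  PySem.Dict.ofList
  [ (("alto", true, true),
      [ "Haz una pausa ahora: 5 minutos de respiración guiada (4-4-4). Si persiste, contacta con un profesional del directorio."
      , "Realiza una actividad breve (5–10 min) que te guste. Si tienes pensamientos de autolesión, busca ayuda inmediatamente." ])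
  , (("alto", true, false),
      [ "Prueba la técnica 4-7-8 de respiración y grounding. Escucha un audio corto de respiración."
      , "Si la ansiedad es recurrente, considera agendar una sesión con un especialista." ])
  , (("alto", false, true),
      [ "Intenta una tarea pequeña y concreta (5-10 min). Si la apatía persiste, busca apoyo profesional."
      , "Actividades programadas (salir a caminar 10 min) pueden ayudar a romper el ciclo." ])
  , (("alto", false, false),
      [ "Haz una pausa y realiza respiraciones profundas durante 5 minutos. Si no mejora, busca apoyo." ])
  , (("medio", true, true),
      [ "Pausa breve + técnica de respiración. Prueba un ejercicio de mindfulness de 5 minutos." ])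
  , (("medio", true, false),
      [ "Pausa breve + técnica de respiración. Prueba un ejercicio de mindfulness de 5 minutos." ])
  , (("medio", false, true),
      [ "Organiza una micro-tarea que te guste; rompe actividades grandes en pasos pequeños." ])
  , (("medio", false, false),
      [ "Tómate una pausa activa y escucha música relajante durante 10 minutos." ])
  , (("bajo", true, true),
      [ "Mantén rutinas saludables: sueño, ejercicio ligero y contacto social. Haz ejercicios de autocuidado." ])
  , (("bajo", true, false),
      [ "Mantén rutinas saludables: sueño, ejercicio ligero y contacto social. Haz ejercicios de autocuidado." ])
  , (("bajo", false, true),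
      [ "Mantén rutinas saludables: sueño, ejercicio ligero y contacto social. Haz ejercicios de autocuidado." ])
  , (("bajo", false, false),
      [ "¡Vas bien! Mantén tus hábitos saludables. Aquí tienes recursos para continuar." ])
  ]

def generar_recomendaciones_alt (nivel_estres : String) (ansiedad : Int) (depresion : Int) (_historial : Option (List String)) : List String :=
  let nivel := if nivel_estres == "alto" || nivel_estres == "medio" then nivel_estres else "bajo"
  -- _TABLA[key]: the key is always present, so Python's dict lookup never raises; getD [] is never hit
  (PySem.Dict.get? pvTabla (nivel, ansiedad != 0, depresion != 0)).getD [] ++ [pvDirectorio]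

-- ===== PRECONDITION & SPEC =====
def Spec_generar_recomendaciones (nivel_estres : String) (ansiedad : Int) (depresion : Int) (historial : Option (List String)) (out : List String) : Prop := out = generar_recomendaciones_alt nivel_estres ansiedad depresion historial
instance (nivel_estres : String) (ansiedad : Int) (depresion : Int) (historial : Option (List String)) (out : List String) : Decidable (Spec_generar_recomendaciones nivel_estres ansiedad depresion historial out) := by unfold Spec_generar_recomendaciones; infer_instance

-- ===== CLAIM (what is proved, stated in full; the proofs are below) =====
def Claim_equal_generar_recomendaciones : Prop := ∀ (nivel_estres : String) (ansiedad : Int) (depresion : Int) (historial : Option (List String)), Dom_generar_recomendaciones nivel_estres ansiedad depresion historial → Spec_generar_recomendaciones nivel_estres ansiedad depresion historial (generar_recomendaciones nivel_estres ansiedad depresion historial)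

-- ===== LEMMAS AND PROOFS =====

-- ===== VERDICT (by name: the statement is the Claim_ definition above) =====
theorem generar_recomendaciones_spec : Claim_equal_generar_recomendaciones := by
  intro nivel ans dep hist _
  unfold Spec_generar_recomendaciones generar_recomendaciones generar_recomendaciones_alt
  cases hA : (ans != 0) <;> cases hD : (dep != 0) <;>
    by_cases ha : nivel = "alto" <;> by_cases hm : nivel = "medio" <;>
      simp_all [pvTabla, pvDirectorio, PySem.Dict.get?, PySem.Dict.ofList, PySem.Set.add, PySem.Set.ofList, PySem.Set.contains] <;> rfl
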